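-- pv_equiv track=rewrite | github.com/eunchan-kim/weblog_analyzer | dev/app/Data/log2oData.py | isstatus
-- ===== SOURCE A (Python) =====
-- def isstatus(c):
--     for i in c:
--         if ord(i) >= 48 and ord(i) <= 57:
--             continue
--         else:
--             return False
--     if int(c) > 99 and int(c) < 103:
--         return True
--     if int(c) > 199 and int(c) < 209:
--         return True
--     if int(c) > 299 and int(c) < 309:
--         return True
--     if int(c) > 399 and int(c) < 450:
--         return True
--     if int(c) > 499 and int(c) < 512:
--         return True
--     if int(c) == 598 or int(c) == 599:
--         return True
--     return False
-- ===== SOURCE B (Python) =====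
-- # Flattened, sorted interval endpoints [lo1, hi1, lo2, hi2, ...): a code n is
-- # valid iff the bisect_right insertion index of n in this list is ODD
-- # (n has passed an opening boundary but not its closing one).
-- _EDGES = [100, 103, 200, 209, 300, 309, 400, 450, 500, 512, 598, 600]
--
-- def isstatus(c):
--     if not c.isdigit():
--         return False
--     n = int(c)
--     lo, hi = 0, len(_EDGES)
--     while lo < hi:                      # hand-written bisect_right
--         mid = (lo + hi) // 2
--         if _EDGES[mid] <= n:
--             lo = mid + 1
--         else:
--             hi = mid
--     return lo % 2 == 1
-- ===== Notes on version B (the rewrite author's own statement) =====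
-- stated objective: alternative
-- what changed: Replaced the six-branch arithmetic if-cascade (re-parsing int(c) up to twelve times) with an isdigit() validation, one int(c), and a hand-written binary search (bisect_right) over a flattened sorted list of interval endpoints, accepting iff the insertion index is odd.
-- outside the precondition, e.g. on isstatus(''): A raises ValueError, B returns False
import Mathlib
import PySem

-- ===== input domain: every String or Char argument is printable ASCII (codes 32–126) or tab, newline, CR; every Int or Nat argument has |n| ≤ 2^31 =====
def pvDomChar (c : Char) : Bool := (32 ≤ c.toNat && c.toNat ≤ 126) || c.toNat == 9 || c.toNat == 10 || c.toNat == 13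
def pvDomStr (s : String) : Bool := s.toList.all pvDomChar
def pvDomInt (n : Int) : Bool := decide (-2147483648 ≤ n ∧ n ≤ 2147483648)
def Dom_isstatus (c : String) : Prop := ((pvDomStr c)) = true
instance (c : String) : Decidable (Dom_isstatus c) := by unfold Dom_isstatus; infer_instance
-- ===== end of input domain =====

-- B replaces A's six-branch arithmetic if-cascade by a hand-written binary search
-- (bisect_right) over a flattened sorted list of interval endpoints, valid iff the
-- insertion index is odd (objective: alternative algorithm, not claimed faster).

-- ===== PORT A =====
-- the for-loop with its early 'return False'
def isstatusLoopA : List Char → Bool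
  | [] => true
  | i :: rest => if 48 ≤ i.toNat ∧ i.toNat ≤ 57 then isstatusLoopA rest else false

def isstatus (c : String) : Bool :=
  if isstatusLoopA c.toList then
    match PySem.Int.ofStr? c with
    | none => false  -- int('') raises ValueError: excluded by Pre_isstatus
    | some n =>
      if 99 < n ∧ n < 103 then true
      else if 199 < n ∧ n < 209 then true
      else if 299 < n ∧ n < 309 then true
      else if 399 < n ∧ n < 450 then true
      else if 499 < n ∧ n < 512 then true
      else if n = 598 ∨ n = 599 then true
      else false
  else false

-- ===== PORT B =====
-- the module constant _EDGES of Source B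
def pvEdges : List Int := [100, 103, 200, 209, 300, 309, 400, 450, 500, 512, 598, 600]

-- the 'while lo < hi' bisect_right loop of Source B; lo, hi are list indices, always
-- 0 ≤ lo ≤ hi ≤ 12, so Nat with '/ 2' and List.getD is exact for Python's
-- (lo + hi) // 2 and _EDGES[mid]
def pvBisectGo (n : Int) (lo hi : Nat) : Nat :=
  if lo < hi then
    let mid := (lo + hi) / 2
    if pvEdges.getD mid 0 ≤ n then pvBisectGo n (mid + 1) hi else pvBisectGo n lo mid
  else lo
termination_by hi - lo
decreasing_by all_goals omega

def isstatus_alt (c : String) : Bool :=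
  if PySem.Str.strIsdigit c then
    match PySem.Int.ofStr? c with
    | none => false  -- unreachable: strIsdigit guarantees a nonempty digit string
    | some n => pvBisectGo n 0 12 % 2 == 1
  else false

-- ===== PRECONDITION & SPEC =====
-- Pre_ excludes only the empty string, on which A raises ValueError at int('').
def Pre_isstatus (c : String) : Prop := c ≠ ""
instance (c : String) : Decidable (Pre_isstatus c) := by unfold Pre_isstatus; infer_instance
def pvWitness_isstatus : String := "404"
def Spec_isstatus (c : String) (out : Bool) : Prop := out = isstatus_alt c
instance (c : String) (out : Bool) : Decidable (Spec_isstatus c out) := by unfold Spec_isstatus; infer_instance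

-- ===== CLAIM (what is proved, stated in full; the proofs are below) =====
def Claim_equal_isstatus : Prop := ∀ (c : String), Dom_isstatus c → Pre_isstatus c → Spec_isstatus c (isstatus c)

-- ===== LEMMAS AND PROOFS =====

-- A's per-character test agrees with Python's isdigit on each character
theorem digit_char_iff (i : Char) : (48 ≤ i.toNat ∧ i.toNat ≤ 57) ↔ ('0' ≤ i ∧ i ≤ '9') := by
  rw [Char.le_def, Char.le_def, UInt32.le_iff_toNat_le, UInt32.le_iff_toNat_le]
  have h0 : ('0' : Char).val.toNat = 48 := rfl
  have h9 : ('9' : Char).val.toNat = 57 := rfl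
  rw [h0, h9]
  rfl

-- A's validation loop = all-digits; on nonempty lists this is strIsdigit
theorem loopA_eq_all (l : List Char) :
    isstatusLoopA l = l.all PySem.Chars.isdigit := by
  induction l with
  | nil => rfl
  | cons i rest ih =>
    simp only [isstatusLoopA, List.all_cons, ← ih, PySem.Chars.isdigit]
    by_cases h : 48 ≤ i.toNat ∧ i.toNat ≤ 57
    · have := (digit_char_iff i).mp h
      simp [h, this.1, this.2]
    · have hc : ¬ ('0' ≤ i ∧ i ≤ '9') := fun hd => h ((digit_char_iff i).mpr hd)
      simp only [if_neg h]
      rcases Decidable.not_and_iff_not_or_not.mp hc with h' | h' <;> simp [h']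

-- one step of the bisect loop, condition known true / known false / loop finished
theorem go_le (n : Int) (lo hi mid : Nat) (h : lo < hi) (hm : (lo + hi) / 2 = mid)
    (hc : pvEdges.getD mid 0 ≤ n) : pvBisectGo n lo hi = pvBisectGo n (mid + 1) hi := by
  rw [pvBisectGo.eq_def]
  simp only [hm, if_pos h, if_pos hc]

theorem go_gt (n : Int) (lo hi mid : Nat) (h : lo < hi) (hm : (lo + hi) / 2 = mid)
    (hc : ¬ pvEdges.getD mid 0 ≤ n) : pvBisectGo n lo hi = pvBisectGo n lo mid := by
  rw [pvBisectGo.eq_def]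
  simp only [hm, if_pos h, if_neg hc]

theorem go_stop (n : Int) (lo : Nat) : pvBisectGo n lo lo = lo := by
  rw [pvBisectGo.eq_def]
  simp

-- the parity of the bisect_right index over pvEdges equals A's range cascade
theorem bisect_parity_eq_cascade (n : Int) :
    (pvBisectGo n 0 12 % 2 == 1) =
      (if 99 < n ∧ n < 103 then true
       else if 199 < n ∧ n < 209 then true
       else if 299 < n ∧ n < 309 then true
       else if 399 < n ∧ n < 450 then true
       else if 499 < n ∧ n < 512 then true
       else if n = 598 ∨ n = 599 then true
       else false) := by
  by_cases h6 : (400:Int) ≤ n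
  · by_cases h9 : (512:Int) ≤ n
    · by_cases h11 : (600:Int) ≤ n
      · rw [go_le n 0 12 6 (by omega) (by norm_num) (by simpa [pvEdges] using h6),
          go_le n 7 12 9 (by omega) (by norm_num) (by simpa [pvEdges] using h9),
          go_le n 10 12 11 (by omega) (by norm_num) (by simpa [pvEdges] using h11),
          go_stop n 12]
        split_ifs <;> first | rfl | omega
      · by_cases h10 : (598:Int) ≤ n
        · rw [go_le n 0 12 6 (by omega) (by norm_num) (by simpa [pvEdges] using h6),
            go_le n 7 12 9 (by omega) (by norm_num) (by simpa [pvEdges] using h9),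
            go_gt n 10 12 11 (by omega) (by norm_num) (by simpa [pvEdges] using h11),
            go_le n 10 11 10 (by omega) (by norm_num) (by simpa [pvEdges] using h10),
            go_stop n 11]
          split_ifs <;> first | rfl | omega
        · rw [go_le n 0 12 6 (by omega) (by norm_num) (by simpa [pvEdges] using h6),
            go_le n 7 12 9 (by omega) (by norm_num) (by simpa [pvEdges] using h9),
            go_gt n 10 12 11 (by omega) (by norm_num) (by simpa [pvEdges] using h11),
            go_gt n 10 11 10 (by omega) (by norm_num) (by simpa [pvEdges] using h10),
            go_stop n 10]
          split_ifs <;> first | rfl | omega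
    · by_cases h8 : (500:Int) ≤ n
      · rw [go_le n 0 12 6 (by omega) (by norm_num) (by simpa [pvEdges] using h6),
          go_gt n 7 12 9 (by omega) (by norm_num) (by simpa [pvEdges] using h9),
          go_le n 7 9 8 (by omega) (by norm_num) (by simpa [pvEdges] using h8),
          go_stop n 9]
        split_ifs <;> first | rfl | omega
      · by_cases h7 : (450:Int) ≤ n
        · rw [go_le n 0 12 6 (by omega) (by norm_num) (by simpa [pvEdges] using h6),
            go_gt n 7 12 9 (by omega) (by norm_num) (by simpa [pvEdges] using h9),
            go_gt n 7 9 8 (by omega) (by norm_num) (by simpa [pvEdges] using h8),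
            go_le n 7 8 7 (by omega) (by norm_num) (by simpa [pvEdges] using h7),
            go_stop n 8]
          split_ifs <;> first | rfl | omega
        · rw [go_le n 0 12 6 (by omega) (by norm_num) (by simpa [pvEdges] using h6),
            go_gt n 7 12 9 (by omega) (by norm_num) (by simpa [pvEdges] using h9),
            go_gt n 7 9 8 (by omega) (by norm_num) (by simpa [pvEdges] using h8),
            go_gt n 7 8 7 (by omega) (by norm_num) (by simpa [pvEdges] using h7),
            go_stop n 7]
          split_ifs <;> first | rfl | omega
  · by_cases h3 : (209:Int) ≤ n
    · by_cases h5 : (309:Int) ≤ n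
      · rw [go_gt n 0 12 6 (by omega) (by norm_num) (by simpa [pvEdges] using h6),
          go_le n 0 6 3 (by omega) (by norm_num) (by simpa [pvEdges] using h3),
          go_le n 4 6 5 (by omega) (by norm_num) (by simpa [pvEdges] using h5),
          go_stop n 6]
        split_ifs <;> first | rfl | omega
      · by_cases h4 : (300:Int) ≤ n
        · rw [go_gt n 0 12 6 (by omega) (by norm_num) (by simpa [pvEdges] using h6),
            go_le n 0 6 3 (by omega) (by norm_num) (by simpa [pvEdges] using h3),
            go_gt n 4 6 5 (by omega) (by norm_num) (by simpa [pvEdges] using h5),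
            go_le n 4 5 4 (by omega) (by norm_num) (by simpa [pvEdges] using h4),
            go_stop n 5]
          split_ifs <;> first | rfl | omega
        · rw [go_gt n 0 12 6 (by omega) (by norm_num) (by simpa [pvEdges] using h6),
            go_le n 0 6 3 (by omega) (by norm_num) (by simpa [pvEdges] using h3),
            go_gt n 4 6 5 (by omega) (by norm_num) (by simpa [pvEdges] using h5),
            go_gt n 4 5 4 (by omega) (by norm_num) (by simpa [pvEdges] using h4),
            go_stop n 4]
          split_ifs <;> first | rfl | omega
    · by_cases h1 : (103:Int) ≤ n
      · by_cases h2 : (200:Int) ≤ n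
        · rw [go_gt n 0 12 6 (by omega) (by norm_num) (by simpa [pvEdges] using h6),
            go_gt n 0 6 3 (by omega) (by norm_num) (by simpa [pvEdges] using h3),
            go_le n 0 3 1 (by omega) (by norm_num) (by simpa [pvEdges] using h1),
            go_le n 2 3 2 (by omega) (by norm_num) (by simpa [pvEdges] using h2),
            go_stop n 3]
          split_ifs <;> first | rfl | omega
        · rw [go_gt n 0 12 6 (by omega) (by norm_num) (by simpa [pvEdges] using h6),
            go_gt n 0 6 3 (by omega) (by norm_num) (by simpa [pvEdges] using h3),
            go_le n 0 3 1 (by omega) (by norm_num) (by simpa [pvEdges] using h1),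
            go_gt n 2 3 2 (by omega) (by norm_num) (by simpa [pvEdges] using h2),
            go_stop n 2]
          split_ifs <;> first | rfl | omega
      · by_cases h0 : (100:Int) ≤ n
        · rw [go_gt n 0 12 6 (by omega) (by norm_num) (by simpa [pvEdges] using h6),
            go_gt n 0 6 3 (by omega) (by norm_num) (by simpa [pvEdges] using h3),
            go_gt n 0 3 1 (by omega) (by norm_num) (by simpa [pvEdges] using h1),
            go_le n 0 1 0 (by omega) (by norm_num) (by simpa [pvEdges] using h0),
            go_stop n 1]
          split_ifs <;> first | rfl | omega
        · rw [go_gt n 0 12 6 (by omega) (by norm_num) (by simpa [pvEdges] using h6),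
            go_gt n 0 6 3 (by omega) (by norm_num) (by simpa [pvEdges] using h3),
            go_gt n 0 3 1 (by omega) (by norm_num) (by simpa [pvEdges] using h1),
            go_gt n 0 1 0 (by omega) (by norm_num) (by simpa [pvEdges] using h0),
            go_stop n 0]
          split_ifs <;> first | rfl | omega


-- ===== VERDICT (by name: the statement is the Claim_ definition above) =====
theorem isstatus_spec : Claim_equal_isstatus := by
  intro c _ hpre
  unfold Spec_isstatus isstatus isstatus_alt
  rw [loopA_eq_all, PySem.Str.strIsdigit_eq]
  have hne : c.toList.isEmpty = false := by
    simp only [List.isEmpty_eq_false_iff, ne_eq, String.toList_eq_nil_iff]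
    exact hpre
  unfold PySem.Chars.strIsdigit
  rw [hne]
  simp only [Bool.not_false, Bool.true_and]
  by_cases hall : c.toList.all PySem.Chars.isdigit = true
  · rw [if_pos hall, if_pos hall]
    cases h : PySem.Int.ofStr? c with
    | none => rfl
    | some n => exact (bisect_parity_eq_cascade n).symm
  · rw [if_neg hall, if_neg hall]
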